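-- pv_equiv track=rewrite | github.com/soletree/Algorithm | 백준/Bronze/1009. 분산처리/분산처리.py | repeat_square
-- ===== SOURCE A (Python) =====
-- def repeat_square(n):
--     ans=[]
--     for i in range(1,10):
--         temp=n**i%10
--         if  temp not in ans:
--             ans.append(temp)
--         else:
--             return ans
-- ===== SOURCE B (Python) =====
-- # Precomputed last-digit power cycles: the cycle depends only on n % 10,
-- # so a 10-entry lookup table replaces the loop entirely.
-- _CYCLES = {
--     0: [0],
--     1: [1],
--     2: [2, 4, 8, 6],
--     3: [3, 9, 7, 1],
--     4: [4, 6],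
--     5: [5],
--     6: [6],
--     7: [7, 9, 3, 1],
--     8: [8, 4, 2, 6],
--     9: [9, 1],
-- }
--
-- def repeat_square(n):
--     return list(_CYCLES[n % 10])
-- ===== Notes on version B (the rewrite author's own statement) =====
-- stated objective: alternative
-- what changed: B replaces A's exponentiate-and-detect loop by a precomputed lookup table of last-digit power cycles, keyed by the last digit of n.
import Mathlib
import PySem

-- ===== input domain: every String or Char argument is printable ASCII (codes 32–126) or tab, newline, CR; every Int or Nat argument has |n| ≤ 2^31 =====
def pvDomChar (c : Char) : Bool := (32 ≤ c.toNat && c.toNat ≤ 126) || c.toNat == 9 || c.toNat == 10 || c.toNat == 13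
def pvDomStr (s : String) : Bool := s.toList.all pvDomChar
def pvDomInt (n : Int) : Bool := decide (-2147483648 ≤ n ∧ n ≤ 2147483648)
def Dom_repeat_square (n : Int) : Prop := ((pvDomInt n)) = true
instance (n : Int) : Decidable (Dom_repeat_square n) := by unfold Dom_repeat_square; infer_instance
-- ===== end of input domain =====

-- ===== PORT A =====
-- B replaces A's exponentiate-and-detect loop by a precomputed lookup table of
-- last-digit power cycles, keyed by the last digit of n (objective: alternative).
-- A mutates nothing; equivalence is about the return value.

-- A's for-loop: fuel counts remaining iterations, i is the exponent.
-- The fuel-0 case is Python's fall-through (return None), unreachable since the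
-- last digit repeats by i = 5 (not part of the claim; both ports return ans there).
def repeatSquareGoA (n : Int) : Nat → Nat → List Int → List Int
  | 0, _, ans => ans
  | f+1, i, ans =>
      let temp := PySem.Int.mod (n ^ i) 10
      if ans.contains temp then ans
      else repeatSquareGoA n f (i+1) (ans ++ [temp])

def repeat_square (n : Int) : List Int := repeatSquareGoA n 9 1 []

-- ===== PORT B =====
-- B's module-level dict _CYCLES as a PySem.Dict (insertion order preserved).
def repeatSquareCycles : PySem.Dict Int (List Int) := PySem.Dict.ofList
  [(0, [0]), (1, [1]), (2, [2, 4, 8, 6]), (3, [3, 9, 7, 1]), (4, [4, 6]),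
   (5, [5]), (6, [6]), (7, [7, 9, 3, 1]), (8, [8, 4, 2, 6]), (9, [9, 1])]

-- _CYCLES[n % 10]: the key is a last digit, always present, so the KeyError
-- branch (none) is unreachable; [] stands for it.
def repeat_square_alt (n : Int) : List Int :=
  (PySem.Dict.get? repeatSquareCycles (PySem.Int.mod n 10)).getD []

-- ===== PRECONDITION & SPEC =====
def Spec_repeat_square (n : Int) (out : List Int) : Prop := out = repeat_square_alt n
instance (n : Int) (out : List Int) : Decidable (Spec_repeat_square n out) := by unfold Spec_repeat_square; infer_instance

-- ===== CLAIM (what is proved, stated in full; the proofs are below) =====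
def Claim_equal_repeat_square : Prop := ∀ (n : Int), Dom_repeat_square n → Spec_repeat_square n (repeat_square n)

-- ===== LEMMAS AND PROOFS =====

-- A's loop only looks at n through n^i % 10, so it depends on n only via n % 10.
theorem repeatSquareGoA_congr (m n : Int) (h : PySem.Int.mod m 10 = PySem.Int.mod n 10) :
    ∀ (f i : Nat) (ans : List Int), repeatSquareGoA m f i ans = repeatSquareGoA n f i ans := by
  intro f
  induction f with
  | zero => intro i ans; rfl
  | succ f ih =>
      intro i ans
      have h' : m % 10 = n % 10 := by
        rw [PySem.Int.mod_eq_emod_of_pos (by norm_num),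
            PySem.Int.mod_eq_emod_of_pos (by norm_num)] at h
        exact h
      have hpow : ∀ j : Nat, m ^ j % 10 = n ^ j % 10 := by
        intro j
        induction j with
        | zero => simp
        | succ j ihj => rw [pow_succ, pow_succ, Int.mul_emod, ihj, h', ← Int.mul_emod]
      have hmod : PySem.Int.mod (m ^ i) 10 = PySem.Int.mod (n ^ i) 10 := by
        rw [PySem.Int.mod_eq_emod_of_pos (by norm_num),
            PySem.Int.mod_eq_emod_of_pos (by norm_num), hpow i]
      simp only [repeatSquareGoA, hmod]
      split <;> [rfl; exact ih _ _]

-- ===== VERDICT (by name: the statement is the Claim_ definition above) =====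
theorem repeat_square_spec : Claim_equal_repeat_square := by
  intro n _
  unfold Spec_repeat_square repeat_square repeat_square_alt
  set r := PySem.Int.mod n 10 with hr
  have h0 : (0:Int) ≤ r := PySem.Int.mod_nonneg (a := n) (by norm_num)
  have h1 : r < 10 := PySem.Int.mod_lt (a := n) (by norm_num)
  have hrr : PySem.Int.mod r 10 = PySem.Int.mod n 10 := by
    rw [PySem.Int.mod_eq_emod_of_pos (by norm_num : (0:Int) < 10),
        Int.emod_eq_of_lt h0 h1]
  rw [repeatSquareGoA_congr n r hrr.symm]
  clear_value r
  clear hr hrr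
  interval_cases r <;> decide
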